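-- pv_equiv track=rewrite | github.com/PTA-Avenger/litLLM | src/stylometric/text_processing.py | detect_line_boundaries
-- ===== SOURCE A (Python) =====
-- from typing import List, Tuple, Dict, Optional
--
-- def detect_line_boundaries(text: str) -> List[Tuple[int, int]]:
--     """Detect line boundaries in text and return their positions.
--
--     Args:
--         text: Poetry text
--
--     Returns:
--         List of (start, end) positions for each line
--     """
--     if not text:
--         return []
--
--     boundaries = []
--     lines = text.split('\n')
--     current_pos = 0
--
--     for line in lines:
--         if line.strip():  # Only include non-empty lines
--             start = current_pos
--             end = current_pos + len(line)
--             boundaries.append((start, end))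
--         current_pos += len(line) + 1  # +1 for the newline character
--
--     return boundaries
-- ===== SOURCE B (Python) =====
-- def detect_line_boundaries(text):
--     """Detect line boundaries via newline positions + sentinels, then a pairwise-span pass."""
--     if not text:
--         return []
--     positions = [-1] + [i for i, c in enumerate(text) if c == '\n'] + [len(text)]
--     boundaries = []
--     for a, b in zip(positions, positions[1:]):
--         if text[a + 1:b].strip():
--             boundaries.append((a + 1, b))
--     return boundaries
-- ===== Notes on version B (the rewrite author's own statement) =====
-- stated objective: alternative
-- what changed: Instead of splitting the text into lines and threading a running current_pos accumulator, B first computes the list of newline indices with sentinels (-1 and len(text)) and then emits spans from consecutive position pairs, slicing the text to test non-emptiness.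
import Mathlib
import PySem

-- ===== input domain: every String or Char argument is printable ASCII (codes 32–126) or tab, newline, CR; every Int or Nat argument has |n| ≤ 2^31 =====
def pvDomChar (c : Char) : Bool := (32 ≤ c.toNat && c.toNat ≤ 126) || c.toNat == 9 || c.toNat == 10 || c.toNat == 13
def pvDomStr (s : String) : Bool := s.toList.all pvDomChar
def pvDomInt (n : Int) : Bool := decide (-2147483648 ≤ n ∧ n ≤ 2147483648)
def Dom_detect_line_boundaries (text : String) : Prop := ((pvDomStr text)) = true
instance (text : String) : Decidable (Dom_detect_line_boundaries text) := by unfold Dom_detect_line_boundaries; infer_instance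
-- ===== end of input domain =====

-- B replaces A's split-into-lines-and-running-offset pass by a newline-index/pairwise-span pass (alternative decomposition, same cost); return values proved equal.

-- ===== PORT A =====
-- A: split into lines, thread current_pos, append (start, end) for lines whose strip is non-empty.
def detect_line_boundaries (text : String) : List (Int × Int) :=
  if text.toList = [] then []
  else
    let lines := PySem.Chars.splitOn text.toList ['\n']
    (lines.foldl
      (fun (st : List (Int × Int) × Int) line =>
        ((if PySem.Chars.strip line ≠ [] then st.1 ++ [(st.2, st.2 + (line.length : Int))] else st.1),
         st.2 + (line.length : Int) + 1))
      ([], 0)).1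

-- ===== PORT B =====
-- B: newline indices with sentinels -1 and len(text); pairwise spans, slice-tested with strip.
def detect_line_boundaries_alt (text : String) : List (Int × Int) :=
  if text.toList = [] then []
  else
    let s := text.toList
    let positions : List Int :=
      -1 :: (((PySem.List.enumerate s 0).filter (fun p => p.2 == '\n')).map (·.1) ++ [(s.length : Int)])
    (positions.zip positions.tail).foldl
      (fun out p =>
        if PySem.Chars.strip (PySem.List.slice s (some (p.1 + 1)) (some p.2)) ≠ [] then
          out ++ [(p.1 + 1, p.2)]
        else out)
      []

-- ===== PRECONDITION & SPEC =====
def Spec_detect_line_boundaries (text : String) (out : List (Int × Int)) : Prop := out = detect_line_boundaries_alt text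
instance (text : String) (out : List (Int × Int)) : Decidable (Spec_detect_line_boundaries text out) := by unfold Spec_detect_line_boundaries; infer_instance

-- ===== CLAIM (what is proved, stated in full; the proofs are below) =====
def Claim_equal_detect_line_boundaries : Prop := ∀ (text : String), Dom_detect_line_boundaries text → Spec_detect_line_boundaries text (detect_line_boundaries text)

-- ===== LEMMAS AND PROOFS =====

/-- Reference split on '\n' (what `Chars.splitOn s ['\n']` computes). -/
def splitNl : List Char → List (List Char)
  | [] => [[]]
  | c :: r => if c = '\n' then [] :: splitNl r else (splitNl r).modifyHead (c :: ·)

theorem splitNl_ne_nil (s : List Char) : splitNl s ≠ [] := by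
  induction s with
  | nil => simp [splitNl]
  | cons c r ih =>
    simp only [splitNl]
    split
    · simp
    · cases h : splitNl r with
      | nil => exact absurd h ih
      | cons a t => simp [List.modifyHead]

theorem go_eq_splitNl : ∀ (fuel : Nat) (l cur : List Char) (acc : List (List Char)),
    l.length ≤ fuel →
    PySem.Chars.splitOn.go ['\n'] fuel l cur acc
      = acc.reverse ++ (splitNl l).modifyHead (cur.reverse ++ ·) := by
  intro fuel
  induction fuel with
  | zero =>
    intro l cur acc h
    have hl : l = [] := List.length_eq_zero_iff.mp (Nat.le_zero.mp h)
    subst hl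
    simp [PySem.Chars.splitOn.go, splitNl, List.modifyHead]
  | succ n ih =>
    intro l cur acc h
    cases l with
    | nil => simp [PySem.Chars.splitOn.go, splitNl, List.modifyHead]
    | cons c rest =>
      have hrest : rest.length ≤ n := by simpa using h
      by_cases hc : c = '\n'
      · subst hc
        have hpre : List.isPrefixOf ['\n'] ('\n' :: rest) = true := by
          simp [List.isPrefixOf]
        rw [PySem.Chars.splitOn.go]
        simp only [hpre]
        rw [show List.drop (['\n'] : List Char).length ('\n' :: rest) = rest by simp]
        rw [ih rest [] (List.reverse cur :: acc) hrest]
        simp only [splitNl]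
        cases hsp : splitNl rest with
        | nil => exact absurd hsp (splitNl_ne_nil rest)
        | cons a t => simp [List.modifyHead]
      · have hpre : List.isPrefixOf ['\n'] (c :: rest) = false := by
          simp [List.isPrefixOf]
          exact fun hh => hc hh.symm
        rw [PySem.Chars.splitOn.go]
        simp only [hpre, Bool.false_eq_true, if_false]
        rw [ih rest (c :: cur) acc hrest]
        simp only [splitNl, if_neg hc]
        cases hsp : splitNl rest with
        | nil => exact absurd hsp (splitNl_ne_nil rest)
        | cons a t => simp [List.modifyHead]

theorem splitOn_eq_splitNl (s : List Char) :
    PySem.Chars.splitOn s ['\n'] = splitNl s := by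
  unfold PySem.Chars.splitOn
  rw [go_eq_splitNl (s.length + 1) s [] [] (Nat.le_succ _)]
  cases hsp : splitNl s with
  | nil => exact absurd hsp (splitNl_ne_nil s)
  | cons a t => simp [List.modifyHead]

/-- No piece of `splitNl s` contains a newline. -/
theorem splitNl_no_nl (s : List Char) : ∀ p ∈ splitNl s, '\n' ∉ p := by
  induction s with
  | nil => intro p hp; simp [splitNl] at hp; simp [hp]
  | cons c r ih =>
    intro p hp
    simp only [splitNl] at hp
    split at hp
    · rcases List.mem_cons.mp hp with hp | hp
      · simp [hp]
      · exact ih p hp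
    · rename_i hc
      cases hsp : splitNl r with
      | nil => exact absurd hsp (splitNl_ne_nil r)
      | cons a t =>
        rw [hsp] at hp
        simp only [List.modifyHead] at hp
        rcases List.mem_cons.mp hp with hp | hp
        · subst hp
          intro hmem
          rcases List.mem_cons.mp hmem with h | h
          · exact hc h.symm
          · exact ih a (by simp [hsp]) h
        · exact ih p (by simp [hsp, hp])

/-- Join pieces back with '\n'. -/
def joinNl : List (List Char) → List Char
  | [] => []
  | [l] => l
  | l :: ls => l ++ '\n' :: joinNl ls

theorem joinNl_cons (l : List Char) (ls : List (List Char)) (h : ls ≠ []) :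
    joinNl (l :: ls) = l ++ '\n' :: joinNl ls := by
  cases ls with
  | nil => exact absurd rfl h
  | cons a t => rfl

theorem joinNl_splitNl (s : List Char) : joinNl (splitNl s) = s := by
  induction s with
  | nil => simp [splitNl, joinNl]
  | cons c r ih =>
    simp only [splitNl]
    split
    · rename_i hc
      rw [joinNl_cons [] (splitNl r) (splitNl_ne_nil r), ih]
      simp [hc]
    · cases hsp : splitNl r with
      | nil => exact absurd hsp (splitNl_ne_nil r)
      | cons a t =>
        rw [hsp] at ih
        simp only [List.modifyHead]
        cases t with
        | nil => simpa [joinNl] using congrArg (c :: ·) ih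
        | cons b u =>
          rw [joinNl_cons (c :: a) (b :: u) (by simp)]
          rw [joinNl_cons a (b :: u) (by simp)] at ih
          simp [← ih]

/-- A's loop as a recursion over the line list. -/
def resA : List (List Char) → Int → List (Int × Int)
  | [], _ => []
  | l :: ls, pos =>
    (if PySem.Chars.strip l ≠ [] then [(pos, pos + (l.length : Int))] else [])
      ++ resA ls (pos + (l.length : Int) + 1)

theorem foldA_eq_resA (ls : List (List Char)) :
    ∀ (acc : List (Int × Int)) (pos : Int),
    (ls.foldl
      (fun (st : List (Int × Int) × Int) line =>
        ((if PySem.Chars.strip line ≠ [] then st.1 ++ [(st.2, st.2 + (line.length : Int))] else st.1),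
         st.2 + (line.length : Int) + 1))
      (acc, pos)).1 = acc ++ resA ls pos := by
  induction ls with
  | nil => intro acc pos; simp [resA]
  | cons l ls ih =>
    intro acc pos
    simp only [List.foldl_cons, resA]
    split
    · rw [ih]; simp
    · rw [ih]; simp

theorem resA_shift (ls : List (List Char)) :
    ∀ (pos d : Int),
    resA ls (pos + d) = (resA ls pos).map (fun q => (q.1 + d, q.2 + d)) := by
  induction ls with
  | nil => intro pos d; simp [resA]
  | cons l ls ih =>
    intro pos d
    simp only [resA, List.map_append]
    congr 1
    · split
      · simp only [List.map_cons, List.map_nil, List.cons.injEq, and_true, Prod.mk.injEq]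
        exact ⟨trivial, by ring⟩
      · simp
    · rw [show pos + d + (l.length : Int) + 1 = (pos + (l.length : Int) + 1) + d by ring, ih]

/-- generic: B's append-if foldl is a filterMap. -/
theorem foldl_if_append {α β : Type} (c : α → Prop) [DecidablePred c] (g : α → β) (l : List α) :
    ∀ (acc : List β),
    l.foldl (fun out p => if c p then out ++ [g p] else out) acc
      = acc ++ l.filterMap (fun p => if c p then some (g p) else none) := by
  induction l with
  | nil => intro acc; simp
  | cons x l ih =>
    intro acc
    simp only [List.foldl_cons, List.filterMap_cons]
    by_cases hx : c x
    · simp only [if_pos hx, ih]; simp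
    · simp [if_neg hx, ih]

/-- newline indices of s (what B's list comprehension computes). -/
def nlIdx (s : List Char) : List Int :=
  ((PySem.List.enumerate s 0).filter (fun p => p.2 == '\n')).map (·.1)

/-- B's sentinel position list. -/
def positionsOf (s : List Char) : List Int :=
  -1 :: (nlIdx s ++ [(s.length : Int)])

/-- B's consecutive span pairs. -/
def pairsOf (s : List Char) : List (Int × Int) :=
  (positionsOf s).zip (positionsOf s).tail

/-- B's filterMap body. -/
def emitB (s : List Char) (p : Int × Int) : Option (Int × Int) :=
  if PySem.Chars.strip (PySem.List.slice s (some (p.1 + 1)) (some p.2)) ≠ [] then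
    some (p.1 + 1, p.2)
  else none

theorem enumerate_shift {α : Type} (xs : List α) :
    ∀ (n : Int), PySem.List.enumerate xs n
      = (PySem.List.enumerate xs 0).map (fun p => (p.1 + n, p.2)) := by
  induction xs with
  | nil => intro n; simp [PySem.List.enumerate_nil]
  | cons x xs ih =>
    intro n
    rw [PySem.List.enumerate_cons, PySem.List.enumerate_cons, ih (n + 1), ih (0 + 1)]
    simp only [List.map_map, List.map_cons, List.cons.injEq, Prod.mk.injEq]
    refine ⟨⟨by ring, trivial⟩, ?_⟩
    apply List.map_congr_left; intro p _
    simp only [Function.comp_apply, Prod.mk.injEq]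
    exact ⟨by ring, trivial⟩

theorem nlIdx_no_nl (l : List Char) (hl : '\n' ∉ l) : nlIdx l = [] := by
  unfold nlIdx
  rw [List.filter_eq_nil_iff.mpr, List.map_nil]
  intro p hp
  rw [PySem.List.mem_enumerate_iff] at hp
  obtain ⟨k, hk, rfl⟩ := hp
  simp only [beq_iff_eq]
  intro hc
  exact hl (hc ▸ List.getElem_mem hk)

theorem nlIdx_append_cons (l s' : List Char) (hl : '\n' ∉ l) :
    nlIdx (l ++ '\n' :: s') = (l.length : Int) :: (nlIdx s').map (· + ((l.length : Int) + 1)) := by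
  unfold nlIdx
  rw [PySem.List.enumerate_append, PySem.List.enumerate_cons, List.filter_append]
  have h1 : (PySem.List.enumerate l 0).filter (fun p => p.2 == '\n') = [] := by
    rw [List.filter_eq_nil_iff]
    intro p hp
    rw [PySem.List.mem_enumerate_iff] at hp
    obtain ⟨k, hk, rfl⟩ := hp
    simp only [beq_iff_eq]
    intro hc
    exact hl (hc ▸ List.getElem_mem hk)
  rw [h1, List.nil_append, List.filter_cons]
  simp only [beq_self_eq_true, if_true, zero_add]
  rw [show (l.length : Int) + 1 = 0 + (l.length : Int) + 1 by ring,
      enumerate_shift s' (0 + (l.length : Int) + 1)]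
  rw [List.filter_map]
  simp only [List.map_map, List.map_cons, List.cons.injEq]
  refine ⟨trivial, ?_⟩
  rw [show ((fun (p : Int × Char) => p.2 == '\n') ∘ fun (p : Int × Char) => (p.1 + (0 + (l.length : Int) + 1), p.2)) = (fun (p : Int × Char) => p.2 == '\n') from by funext p; rfl]
  apply List.map_congr_left; intro p _
  rfl

theorem positionsOf_append_cons (l s' : List Char) (hl : '\n' ∉ l) :
    positionsOf (l ++ '\n' :: s')
      = -1 :: (positionsOf s').map (· + ((l.length : Int) + 1)) := by
  unfold positionsOf
  rw [nlIdx_append_cons l s' hl]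
  simp only [List.map_cons, List.map_append, List.map_nil, List.cons_append,
    List.cons.injEq, List.append_cancel_left_eq]
  refine ⟨trivial, by omega, by simp [List.length_append]; omega, trivial⟩

theorem zip_tail_map (P : List Int) (f : Int → Int) :
    ((P.map f).zip (P.map f).tail) = (P.zip P.tail).map (Prod.map f f) := by
  have ht : (P.map f).tail = P.tail.map f := by cases P <;> simp
  rw [ht, List.zip_map]

theorem pairsOf_append_cons (l s' : List Char) (hl : '\n' ∉ l) :
    pairsOf (l ++ '\n' :: s')
      = (-1, (l.length : Int))
        :: (pairsOf s').map (Prod.map (· + ((l.length : Int) + 1)) (· + ((l.length : Int) + 1))) := by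
  unfold pairsOf
  rw [positionsOf_append_cons l s' hl, List.tail_cons]
  set d : Int := (l.length : Int) + 1 with hd
  have hQ : (positionsOf s').map (· + d) = (-1 + d) :: ((nlIdx s' ++ [(s'.length : Int)]).map (· + d)) := by
    unfold positionsOf; simp
  have hzip := zip_tail_map (positionsOf s') (· + d)
  rw [hQ] at hzip ⊢
  rw [List.tail_cons] at hzip
  rw [List.zip_cons_cons, hzip]
  rw [show (-1 + d) = (l.length : Int) from by omega]

theorem mem_positionsOf_tail_bounds (s : List Char) :
    ∀ x ∈ nlIdx s ++ [(s.length : Int)], 0 ≤ x ∧ x ≤ (s.length : Int) := by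
  intro x hx
  rcases List.mem_append.mp hx with hx | hx
  · unfold nlIdx at hx
    simp only [List.mem_map, List.mem_filter] at hx
    obtain ⟨p, ⟨hp, _⟩, rfl⟩ := hx
    rw [PySem.List.mem_enumerate_iff] at hp
    obtain ⟨k, hk, rfl⟩ := hp
    have : k < s.length := by simpa using hk
    simp only []
    constructor <;> omega
  · simp at hx
    omega

theorem mem_positionsOf_bounds (s : List Char) :
    ∀ x ∈ positionsOf s, -1 ≤ x ∧ x ≤ (s.length : Int) := by
  intro x hx
  unfold positionsOf at hx
  rcases List.mem_cons.mp hx with rfl | hx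
  · exact ⟨by omega, by omega⟩
  · have := mem_positionsOf_tail_bounds s x hx
    exact ⟨by omega, this.2⟩

theorem mem_pairsOf_bounds (s : List Char) :
    ∀ p ∈ pairsOf s, -1 ≤ p.1 ∧ 0 ≤ p.2 ∧ p.2 ≤ (s.length : Int) := by
  intro p hp
  obtain ⟨x, y⟩ := p
  unfold pairsOf at hp
  have h := List.of_mem_zip hp
  have h1 := mem_positionsOf_bounds s x h.1
  have h2 : y ∈ nlIdx s ++ [(s.length : Int)] := by
    have := h.2
    simpa only [positionsOf, List.tail_cons] using this
  have h3 := mem_positionsOf_tail_bounds s y h2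
  exact ⟨h1.1, h3.1, h3.2⟩

theorem slice_shift (l s' : List Char) (a b : Int)
    (ha : -1 ≤ a) (hb : 0 ≤ b) (_hble : b ≤ (s'.length : Int)) :
    PySem.List.slice (l ++ '\n' :: s')
        (some (a + ((l.length : Int) + 1) + 1)) (some (b + ((l.length : Int) + 1)))
      = PySem.List.slice s' (some (a + 1)) (some b) := by
  rw [PySem.List.slice_toNat _ (by omega) (by omega),
      PySem.List.slice_toNat _ (by omega) hb]
  have hdrop : List.drop (a + ((l.length : Int) + 1) + 1).toNat (l ++ '\n' :: s')
      = List.drop (a + 1).toNat s' := by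
    rw [show (a + ((l.length : Int) + 1) + 1).toNat = (l ++ ['\n']).length + (a + 1).toNat from by
      simp [List.length_append]; omega]
    rw [show (l ++ '\n' :: s') = (l ++ ['\n']) ++ s' from by simp]
    rw [← List.drop_drop, List.drop_left]
  have hcnt : (b + ((l.length : Int) + 1)).toNat - (a + ((l.length : Int) + 1) + 1).toNat
      = b.toNat - (a + 1).toNat := by omega
  rw [hdrop, hcnt]

theorem slice_head (l rest : List Char) :
    PySem.List.slice (l ++ rest) (some ((-1 : Int) + 1)) (some (l.length : Int)) = l := by
  rw [show ((-1 : Int) + 1) = ((0 : Nat) : Int) from by norm_num]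
  rw [PySem.List.slice_natCast]
  simp

theorem prodmap_eq (d : Int) :
    (Prod.map (· + d) (· + d) : Int × Int → Int × Int) = fun q => (q.1 + d, q.2 + d) := by
  funext q; rfl

/-- Main lemma: B's pairwise-span pass over the joined text equals A's recursion over the lines. -/
theorem pairs_eq_resA : ∀ (ls : List (List Char)), ls ≠ [] → (∀ p ∈ ls, '\n' ∉ p) →
    (pairsOf (joinNl ls)).filterMap (emitB (joinNl ls)) = resA ls 0 := by
  intro ls
  induction ls with
  | nil => intro h _; exact absurd rfl h
  | cons l ls' ih =>
    intro _ hnl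
    cases ls' with
    | nil =>
      -- single line, no newline in it
      have hl : '\n' ∉ l := hnl l (by simp)
      show (pairsOf (joinNl [l])).filterMap (emitB (joinNl [l])) = resA [l] 0
      have hj : joinNl [l] = l := rfl
      rw [hj]
      unfold pairsOf positionsOf
      rw [nlIdx_no_nl l hl]
      simp only [List.nil_append, List.tail_cons, List.zip_cons_cons, List.zip_nil_right,
        List.filterMap_cons, List.filterMap_nil]
      unfold emitB
      have hsl : PySem.List.slice l (some ((-1 : Int) + 1)) (some (l.length : Int)) = l := by
        have := slice_head l []
        rwa [List.append_nil] at this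
      simp only [hsl]
      by_cases hstrip : PySem.Chars.strip l = []
      · simp [resA, hstrip]
      · simp [resA, hstrip]
    | cons l2 ls'' =>
      set ls2 := l2 :: ls'' with hls2
      have hl : '\n' ∉ l := hnl l (by simp)
      have hnl2 : ∀ p ∈ ls2, '\n' ∉ p := fun p hp => hnl p (List.mem_cons_of_mem l hp)
      have hne2 : ls2 ≠ [] := by simp [hls2]
      set s' := joinNl ls2 with hs'
      have hj : joinNl (l :: ls2) = l ++ '\n' :: s' := joinNl_cons l ls2 hne2
      rw [hj]
      set d : Int := (l.length : Int) + 1 with hd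
      rw [pairsOf_append_cons l s' hl, List.filterMap_cons]
      have hhead : emitB (l ++ '\n' :: s') (-1, (l.length : Int))
          = if PySem.Chars.strip l ≠ [] then some (0, (l.length : Int)) else none := by
        unfold emitB
        rw [slice_head l ('\n' :: s')]
        norm_num
      have htail : ((pairsOf s').map (Prod.map (· + d) (· + d))).filterMap (emitB (l ++ '\n' :: s'))
          = ((pairsOf s').filterMap (emitB s')).map (Prod.map (· + d) (· + d)) := by
        rw [List.filterMap_map]
        have hcong : ∀ p ∈ pairsOf s',
            (emitB (l ++ '\n' :: s') ∘ Prod.map (· + d) (· + d)) p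
              = (fun q => (emitB s' q).map (Prod.map (· + d) (· + d))) p := by
          intro p hp
          obtain ⟨ha, hb, hble⟩ := mem_pairsOf_bounds s' p hp
          obtain ⟨x, y⟩ := p
          simp only [Function.comp_apply, Prod.map_apply]
          unfold emitB
          rw [hd, slice_shift l s' x y ha hb hble]
          split
          · simp only [Option.map_some, Prod.map_apply, Option.some.injEq, Prod.mk.injEq]
            exact ⟨by omega, trivial⟩
          · simp
        rw [List.filterMap_congr hcong, ← List.map_filterMap]
      rw [htail, ih hne2 hnl2]
      show _ = resA (l :: ls2) 0
      simp only [resA]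
      rw [show (0 : Int) + (l.length : Int) + 1 = 0 + d from by omega]
      rw [resA_shift ls2 0 d, hhead, prodmap_eq]
      by_cases hstrip : PySem.Chars.strip l = []
      · simp [hstrip]
      · simp only [hstrip, ne_eq, not_false_iff, if_pos]
        rw [show ((0 : Int), (l.length : Int)) = (((0 : Int), (0 : Int) + (l.length : Int)) : Int × Int) from by norm_num]
        simp

-- ===== VERDICT (by name: the statement is the Claim_ definition above) =====
theorem detect_line_boundaries_spec : Claim_equal_detect_line_boundaries := by
  intro text _
  unfold Spec_detect_line_boundaries detect_line_boundaries detect_line_boundaries_alt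
  by_cases h : text.toList = []
  · simp [h]
  · simp only [if_neg h]
    set s := text.toList with hs
    rw [splitOn_eq_splitNl s]
    rw [foldA_eq_resA (splitNl s) [] 0, List.nil_append]
    have hB : ((-1 :: (((PySem.List.enumerate s 0).filter (fun p => p.2 == '\n')).map (·.1) ++ [(s.length : Int)])).zip
        (-1 :: (((PySem.List.enumerate s 0).filter (fun p => p.2 == '\n')).map (·.1) ++ [(s.length : Int)])).tail).foldl
          (fun out p =>
            if PySem.Chars.strip (PySem.List.slice s (some (p.1 + 1)) (some p.2)) ≠ [] then
              out ++ [(p.1 + 1, p.2)]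
            else out) []
        = (pairsOf s).filterMap (emitB s) := by
      rw [foldl_if_append (fun p : Int × Int => PySem.Chars.strip (PySem.List.slice s (some (p.1 + 1)) (some p.2)) ≠ []) (fun p => (p.1 + 1, p.2))]
      rw [List.nil_append]
      rfl
    rw [hB]
    rw [← pairs_eq_resA (splitNl s) (splitNl_ne_nil s) (splitNl_no_nl s)]
    rw [joinNl_splitNl s]
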